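-- pv_equiv track=rewrite | github.com/biemt-pesc-coppe-ufrj/VitorJoaoDouglas | StmBrenchmark/paice.py | truncar
-- ===== SOURCE A (Python) =====
-- def truncar(words, cutlength):
--     stems = {}
--     for word in words:
--         stem = word[:cutlength]
--         try:
--             stems[stem].update([word])
--         except KeyError:
--             stems[stem] = set([word])
--     return stems
-- ===== SOURCE B (Python) =====
-- def truncar(words, cutlength):
--     prefixes = list(dict.fromkeys(w[:cutlength] for w in words))
--     return {p: {w for w in words if w[:cutlength] == p} for p in prefixes}
-- ===== Notes on version B (the rewrite author's own statement) =====
-- stated objective: alternative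
-- what changed: Replaces the online try/except dict accumulation by a two-pass decomposition: first an ordered dedup of the prefixes, then a dict comprehension whose inner filter collects each prefix's words.
import Mathlib
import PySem

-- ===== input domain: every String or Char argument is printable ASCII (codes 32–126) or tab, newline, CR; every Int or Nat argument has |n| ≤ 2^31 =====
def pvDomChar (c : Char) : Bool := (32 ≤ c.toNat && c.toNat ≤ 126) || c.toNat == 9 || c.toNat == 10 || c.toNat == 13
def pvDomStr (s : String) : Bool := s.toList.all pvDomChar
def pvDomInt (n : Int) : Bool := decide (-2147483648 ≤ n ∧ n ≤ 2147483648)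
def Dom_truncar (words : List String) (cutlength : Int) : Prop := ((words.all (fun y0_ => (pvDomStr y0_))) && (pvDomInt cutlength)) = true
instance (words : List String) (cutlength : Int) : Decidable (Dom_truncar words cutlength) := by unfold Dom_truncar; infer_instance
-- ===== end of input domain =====

-- B replaces A's online try/except dict accumulation by a two-pass decomposition (ordered
-- dedup of prefixes, then an inner filter per prefix); objective: alternative, not faster.

-- word[:cutlength], shared by both ports (both Pythons compute exactly this slice)
def pvStem (cut : Int) (w : String) : String := PySem.Str.slice w none (some cut)

-- ===== PORT A =====
-- 'try: stems[stem].update([word]) / except KeyError: stems[stem] = set([word])' is exactly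
-- stems[stem] = (stems.get(stem, set())).update([word]), i.e. Dict.modify with default empty set.
def truncar (words : List String) (cutlength : Int) : List (String × List String) :=
  (words.foldl (fun stems word =>
      stems.modify (pvStem cutlength word) PySem.Set.empty (fun s => PySem.Set.update s [word]))
    PySem.Dict.empty).items

-- ===== PORT B =====
def truncar_alt (words : List String) (cutlength : Int) : List (String × List String) :=
  (PySem.List.dedup (words.map (pvStem cutlength))).map
    (fun p => (p, PySem.Set.ofList (words.filter (fun w => pvStem cutlength w == p))))

-- ===== PRECONDITION & SPEC =====
def Spec_truncar (words : List String) (cutlength : Int) (out : List (String × List String)) : Prop := out = truncar_alt words cutlength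
instance (words : List String) (cutlength : Int) (out : List (String × List String)) : Decidable (Spec_truncar words cutlength out) := by unfold Spec_truncar; infer_instance

-- ===== CLAIM (what is proved, stated in full; the proofs are below) =====
def Claim_equal_truncar : Prop := ∀ (words : List String) (cutlength : Int), Dom_truncar words cutlength → Spec_truncar words cutlength (truncar words cutlength)

-- ===== LEMMAS AND PROOFS =====

-- value at key k after A's loop: the old value updated with all words whose stem is k, in order
theorem pv_getD_loop (cut : Int) (l : List String) (d : PySem.Dict String (List String)) (k : String) :
    (l.foldl (fun stems word =>
        stems.modify (pvStem cut word) PySem.Set.empty (fun s => PySem.Set.update s [word])) d).getD k PySem.Set.empty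
      = PySem.Set.update (d.getD k PySem.Set.empty) (l.filter (fun w => pvStem cut w == k)) := by
  induction l generalizing d with
  | nil => rfl
  | cons w l ih =>
    simp only [List.foldl_cons, ih, List.filter_cons]
    by_cases h : pvStem cut w = k
    · simp [h, PySem.Set.update]
    · simp [h, PySem.Dict.getD_modify, Ne.symm h]

-- a dict with unique keys is its key list paired with its lookups
theorem pv_items_eq_keys_map {ν : Type} (d : PySem.Dict String ν) (dflt : ν) (h : d.keys.Nodup) :
    d.items = d.keys.map (fun k => (k, d.getD k dflt)) := by
  have : ∀ p ∈ d.items, (p.1, d.getD p.1 dflt) = p := by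
    intro p hp
    have hg := PySem.Dict.get?_of_mem_items d (k := p.1) (v := p.2) (by simpa using hp) h
    have : d.getD p.1 dflt = p.2 := by
      show (d.get? p.1).getD dflt = p.2
      rw [hg]; rfl
    simp [this]
  calc d.items = d.items.map id := by simp
    _ = d.items.map (fun p => (p.1, d.getD p.1 dflt)) := (List.map_congr_left (by simpa using fun p hp => (this p hp).symm))
    _ = d.keys.map (fun k => (k, d.getD k dflt)) := by
        show _ = (d.items.map (·.1)).map _
        rw [List.map_map]; rfl

theorem pv_main (words : List String) (cutlength : Int) :
    truncar words cutlength = truncar_alt words cutlength := by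
  unfold truncar truncar_alt
  set F := fun (stems : PySem.Dict String (List String)) (word : String) =>
      stems.modify (pvStem cutlength word) PySem.Set.empty (fun s => PySem.Set.update s [word]) with hF
  have hkeys : (words.foldl F PySem.Dict.empty).keys
      = PySem.Set.ofList (words.map (pvStem cutlength)) := by
    rw [hF]
    rw [PySem.Dict.keys_foldl_modify_key words (pvStem cutlength) PySem.Set.empty
      (fun _ w => fun s => PySem.Set.update s [w]) PySem.Dict.empty]
    rfl
  have hnodup : (words.foldl F PySem.Dict.empty).keys.Nodup := by
    rw [hkeys]; exact PySem.Set.nodup_ofList _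
  rw [pv_items_eq_keys_map _ PySem.Set.empty hnodup, hkeys, PySem.List.dedup_eq_ofList]
  refine List.map_congr_left ?_
  intro k _
  rw [hF, pv_getD_loop]
  rfl

-- ===== VERDICT (by name: the statement is the Claim_ definition above) =====
theorem truncar_spec : Claim_equal_truncar := by
  intro words cutlength _
  exact pv_main words cutlength
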